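-- pv_equiv track=rewrite | github.com/isabellebryans/delivery-fee-calculator | main.py | num_items_fee
-- ===== SOURCE A (Python) =====
-- def num_items_fee(num_items):
--     fee = 0
--
--     if num_items > 12:
--         fee = 120
--
--     while num_items > 4:
--         num_items -= 1
--         fee += 50
--
--     return fee
-- ===== SOURCE B (Python) =====
-- def num_items_fee(num_items):
--     # closed form: 50 per item above 4, plus 120 bulk surcharge above 12
--     surcharge = 120 if num_items > 12 else 0
--     extra_items = num_items - 4 if num_items > 4 else 0
--     return surcharge + 50 * extra_items
-- ===== Notes on version B (the rewrite author's own statement) =====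
-- stated objective: faster
-- what changed: Replaces the while-loop that adds 50 per item above 4 with a closed-form arithmetic expression.
import Mathlib
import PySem

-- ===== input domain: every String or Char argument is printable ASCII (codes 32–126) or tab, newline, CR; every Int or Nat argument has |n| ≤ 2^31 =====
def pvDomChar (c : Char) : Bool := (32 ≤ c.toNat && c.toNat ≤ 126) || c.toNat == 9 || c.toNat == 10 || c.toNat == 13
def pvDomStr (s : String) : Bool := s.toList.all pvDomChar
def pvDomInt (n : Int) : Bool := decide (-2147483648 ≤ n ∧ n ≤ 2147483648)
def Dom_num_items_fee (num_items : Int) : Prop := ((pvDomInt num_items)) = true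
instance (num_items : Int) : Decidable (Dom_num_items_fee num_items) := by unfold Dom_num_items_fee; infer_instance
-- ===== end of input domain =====

-- B replaces A's per-item while-loop with a closed-form arithmetic expression (asymptotically faster).


-- ===== PORT A =====
-- literal port of A's while-loop: while num_items > 4: num_items -= 1; fee += 50
def numItemsLoop (num_items fee : Int) : Int :=
  if num_items > 4 then numItemsLoop (num_items - 1) (fee + 50) else fee
termination_by (num_items - 4).toNat
decreasing_by omega

def num_items_fee (num_items : Int) : Int :=
  let fee : Int := 0
  let fee := if num_items > 12 then 120 else fee
  numItemsLoop num_items fee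

-- ===== PORT B =====
def num_items_fee_alt (num_items : Int) : Int :=
  let surcharge : Int := if num_items > 12 then 120 else 0
  let extra_items : Int := if num_items > 4 then num_items - 4 else 0
  surcharge + 50 * extra_items

-- ===== PRECONDITION & SPEC =====
def Spec_num_items_fee (num_items : Int) (out : Int) : Prop := out = num_items_fee_alt num_items
instance (num_items : Int) (out : Int) : Decidable (Spec_num_items_fee num_items out) := by unfold Spec_num_items_fee; infer_instance

-- ===== CLAIM (what is proved, stated in full; the proofs are below) =====
def Claim_equal_num_items_fee : Prop := ∀ (num_items : Int), Dom_num_items_fee num_items → Spec_num_items_fee num_items (num_items_fee num_items)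

-- ===== LEMMAS AND PROOFS =====
theorem numItemsLoop_closed (n fee : Int) :
    numItemsLoop n fee = fee + 50 * (if n > 4 then n - 4 else 0) := by
  induction n, fee using numItemsLoop.induct with
  | case1 n fee h ih =>
      rw [numItemsLoop, if_pos h, ih]
      split_ifs
      all_goals omega
  | case2 n fee h =>
      rw [numItemsLoop, if_neg h]
      split_ifs
      all_goals omega

-- ===== VERDICT (by name: the statement is the Claim_ definition above) =====
theorem num_items_fee_spec : Claim_equal_num_items_fee := by
  intro n _
  unfold Spec_num_items_fee num_items_fee num_items_fee_alt
  rw [numItemsLoop_closed]
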